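-- pv_equiv track=rewrite | github.com/MemonAshfaq/DSA | string_operations.py | _find_word_within_a_string
-- ===== SOURCE A (Python) =====
-- def _find_word_within_a_string(s:str,ss:str) -> bool:
--     ls = len(s)
--     lss = len(ss)
--
--     i = j = 0
--
--     while (i < ls and j < lss):
--         if s[i] == ss[j]:
--             j += 1
--         i += 1
--     return (j == lss)
-- ===== SOURCE B (Python) =====
-- def _find_word_within_a_string(s: str, ss: str) -> bool:
--     # Subsequence check via a precomputed occurrence index:
--     # map each character of s to the sorted list of its positions, then for each
--     # character of ss binary-search the first occurrence at or after the cursor.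
--     pos = {}
--     for i, c in enumerate(s):
--         pos.setdefault(c, []).append(i)
--     cur = 0
--     for c in ss:
--         lst = pos.get(c, [])
--         lo, hi = 0, len(lst)
--         while lo < hi:
--             mid = (lo + hi) // 2
--             if lst[mid] < cur:
--                 lo = mid + 1
--             else:
--                 hi = mid
--         if lo == len(lst):
--             return False
--         cur = lst[lo] + 1
--     return True
-- ===== Notes on version B (the rewrite author's own statement) =====
-- stated objective: alternative
-- what changed: Replaces the two-index greedy while loop over s with a two-stage algorithm: first build a dict mapping each character to its sorted occurrence positions in s, then for each character of ss binary-search that character's position list for the first occurrence at or after a cursor.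
import Mathlib
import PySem

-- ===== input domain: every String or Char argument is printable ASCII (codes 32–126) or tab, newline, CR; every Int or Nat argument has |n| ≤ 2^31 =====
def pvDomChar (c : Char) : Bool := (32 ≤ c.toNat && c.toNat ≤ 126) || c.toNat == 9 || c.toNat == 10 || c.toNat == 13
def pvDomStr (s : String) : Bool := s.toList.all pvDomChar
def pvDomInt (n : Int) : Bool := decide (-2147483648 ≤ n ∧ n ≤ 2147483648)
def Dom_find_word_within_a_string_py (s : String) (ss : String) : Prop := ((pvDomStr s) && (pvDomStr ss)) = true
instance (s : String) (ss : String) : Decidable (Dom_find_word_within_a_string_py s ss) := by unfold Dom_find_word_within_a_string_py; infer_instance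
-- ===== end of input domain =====

-- B replaces A's greedy two-index scan by an occurrence index plus binary search (objective: alternative algorithm, same results).

-- ===== PORT A =====
-- while i < ls and j < lss: advance j when s[i] == ss[j]; return j == lss
-- (structural recursion over s carrying the still-unmatched tail of ss)
def pvGoA : List Char → List Char → Bool
  | _, [] => true
  | [], _ :: _ => false
  | c :: s, d :: ss => pvGoA s (if c == d then ss else d :: ss)

def find_word_within_a_string_py (s : String) (ss : String) : Bool :=
  pvGoA s.toList ss.toList

-- ===== PORT B =====
-- for i, c in enumerate(s): pos.setdefault(c, []).append(i)
def pvBuildPos : List (Int × Char) → PySem.Dict Char (List Int) → PySem.Dict Char (List Int)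
  | [], d => d
  | (i, c) :: rest, d => pvBuildPos rest (d.insert c (d.getD c [] ++ [i]))

-- the hand-written binary search of Source B: while lo < hi: mid = (lo+hi)//2; …
-- (lst[mid] read with getD; the loop only probes mid < hi ≤ len(lst), where getD is exact)
def pvBisect (lst : List Int) (cur : Int) (lo hi : Nat) : Nat :=
  if lo < hi then
    let mid := (lo + hi) / 2
    if lst.getD mid 0 < cur then pvBisect lst cur (mid + 1) hi
    else pvBisect lst cur lo mid
  else lo
termination_by hi - lo
decreasing_by all_goals omega

-- for c in ss: lst = pos.get(c, []); binary search; early return False / advance cur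
def pvMatchB (pos : PySem.Dict Char (List Int)) : List Char → Int → Bool
  | [], _ => true
  | c :: cs, cur =>
    let lst := pos.getD c []
    let lo := pvBisect lst cur 0 lst.length
    if lo = lst.length then false
    else pvMatchB pos cs (lst.getD lo 0 + 1)

def find_word_within_a_string_py_alt (s : String) (ss : String) : Bool :=
  pvMatchB (pvBuildPos (PySem.List.enumerate s.toList) PySem.Dict.empty) ss.toList 0

-- ===== PRECONDITION & SPEC =====
def Spec_find_word_within_a_string_py (s : String) (ss : String) (out : Bool) : Prop := out = find_word_within_a_string_py_alt s ss
instance (s : String) (ss : String) (out : Bool) : Decidable (Spec_find_word_within_a_string_py s ss out) := by unfold Spec_find_word_within_a_string_py; infer_instance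

-- ===== CLAIM (what is proved, stated in full; the proofs are below) =====
def Claim_equal_find_word_within_a_string_py : Prop := ∀ (s : String) (ss : String), Dom_find_word_within_a_string_py s ss → Spec_find_word_within_a_string_py s ss (find_word_within_a_string_py s ss)

-- ===== LEMMAS AND PROOFS =====

-- proof-only intermediate: 'scan for c, return the suffix after the first match'
def pvConsume (c : Char) : List Char → Option (List Char)
  | [] => none
  | x :: xs => if x == c then some xs else pvConsume c xs

-- proof-only intermediate: consume-based subsequence check (outer loop over ss)
def pvGoB : List Char → List Char → Bool
  | [], _ => true
  | c :: cs, s =>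
    match pvConsume c s with
    | none => false
    | some s' => pvGoB cs s'

theorem pvGoA_cons (s : List Char) (d : Char) (ss : List Char) :
    pvGoA s (d :: ss) = match pvConsume d s with
      | none => false
      | some s' => pvGoA s' ss := by
  induction s with
  | nil => simp [pvGoA, pvConsume]
  | cons c s ih =>
    by_cases h : c = d
    · simp [pvGoA, pvConsume, h]
    · simp [pvGoA, pvConsume, h, ih]

theorem pvGoA_eq_pvGoB (ss s : List Char) : pvGoA s ss = pvGoB ss s := by
  induction ss generalizing s with
  | nil => cases s <;> simp [pvGoA, pvGoB]
  | cons d ss ih =>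
    rw [pvGoA_cons]
    cases h : pvConsume d s <;> simp [pvGoB, h, ih]

-- proof-only: the occurrence positions of c in l, indices starting at st
def pvOcc : List Char → Char → Int → List Int
  | [], _, _ => []
  | x :: xs, c, st => (if x == c then [st] else []) ++ pvOcc xs c (st + 1)

theorem pvOcc_mem_ge {l : List Char} {c : Char} {st k : Int} (h : k ∈ pvOcc l c st) : st ≤ k := by
  induction l generalizing st with
  | nil => simp [pvOcc] at h
  | cons x xs ih =>
    simp only [pvOcc, List.mem_append] at h
    rcases h with h | h
    · split at h <;> simp_all
    · have := ih h; omega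

theorem pvOcc_mem_lt {l : List Char} {c : Char} {st k : Int} (h : k ∈ pvOcc l c st) : k < st + l.length := by
  induction l generalizing st with
  | nil => simp [pvOcc] at h
  | cons x xs ih =>
    simp only [pvOcc, List.mem_append] at h
    rcases h with h | h
    · split at h <;> simp_all
    · have := ih h
      simp only [List.length_cons]
      push_cast
      omega

theorem pvOcc_pairwise (l : List Char) (c : Char) (st : Int) : (pvOcc l c st).Pairwise (· < ·) := by
  induction l generalizing st with
  | nil => simp [pvOcc]
  | cons x xs ih =>
    simp only [pvOcc]
    rw [List.pairwise_append]
    refine ⟨?_, ih _, ?_⟩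
    · split <;> simp
    · intro a ha b hb
      have hb' := pvOcc_mem_ge hb
      split at ha <;> simp_all

theorem pvOcc_append (t u : List Char) (c : Char) (st : Int) :
    pvOcc (t ++ u) c st = pvOcc t c st ++ pvOcc u c (st + t.length) := by
  induction t generalizing st with
  | nil => simp [pvOcc]
  | cons x xs ih =>
    simp only [List.cons_append, pvOcc, ih, List.length_cons]
    rw [List.append_assoc]
    congr 2
    push_cast; ring_nf

-- the built dict's value at c is the occurrence list of c
theorem pvBuildPos_getD (l : List Char) (st : Int) (d : PySem.Dict Char (List Int)) (c : Char) :
    (pvBuildPos (PySem.List.enumerate l st) d).getD c [] = d.getD c [] ++ pvOcc l c st := by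
  induction l generalizing st d with
  | nil => simp [PySem.List.enumerate_nil, pvBuildPos, pvOcc]
  | cons x xs ih =>
    rw [PySem.List.enumerate_cons]
    simp only [pvBuildPos, pvOcc]
    rw [ih]
    rw [PySem.Dict.getD_insert]
    by_cases h : c = x
    · subst h; simp [List.append_assoc]
    · have hne : ¬ x = c := fun hh => h hh.symm
      simp [h, hne]

theorem pvPos_getD (l : List Char) (c : Char) :
    (pvBuildPos (PySem.List.enumerate l) PySem.Dict.empty).getD c [] = pvOcc l c 0 := by
  have := pvBuildPos_getD l 0 PySem.Dict.empty c
  simpa [PySem.Dict.getD, PySem.Dict.get?, PySem.Dict.empty] using this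

-- consume = first element of the occurrence list of the scanned suffix
theorem pvConsume_eq_occ_head (t : List Char) (c : Char) (st : Int) :
    pvConsume c t = (pvOcc t c st).head?.map (fun k => t.drop ((k - st).toNat + 1)) := by
  induction t generalizing st with
  | nil => simp [pvConsume, pvOcc]
  | cons x xs ih =>
    by_cases h : x = c
    · simp [pvConsume, pvOcc, h]
    · have hne : (x == c) = false := by simp [h]
      simp only [pvConsume, pvOcc, hne, Bool.false_eq_true, if_false, List.nil_append]
      rw [ih (st + 1)]
      cases hh : (pvOcc xs c (st + 1)).head? with
      | none => simp
      | some k =>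
        have hk : k ∈ pvOcc xs c (st + 1) := List.mem_of_mem_head? hh
        have hge := pvOcc_mem_ge hk
        simp only [Option.map_some, Option.some.injEq]
        have h2 : (k - st).toNat = (k - (st + 1)).toNat + 1 := by omega
        rw [h2]
        simp [List.drop_succ_cons]

-- monotone access form of sortedness
theorem pvOcc_mono (l : List Char) (c : Char) {i j : Nat} (hij : i ≤ j) (hj : j < (pvOcc l c 0).length) :
    (pvOcc l c 0).getD i 0 ≤ (pvOcc l c 0).getD j 0 := by
  rcases Nat.lt_or_ge i j with h | h
  · have hp := pvOcc_pairwise l c 0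
    rw [List.pairwise_iff_getElem] at hp
    have := hp i j (by omega) hj h
    rw [List.getD_eq_getElem _ _ (by omega), List.getD_eq_getElem _ _ hj]
    omega
  · have : i = j := by omega
    subst this; rfl

-- invariant spec of the hand-written binary search
theorem pvBisect_spec (lst : List Int) (cur : Int)
    (hmono : ∀ i j, i ≤ j → j < lst.length → lst.getD i 0 ≤ lst.getD j 0) (lo hi : Nat)
    (hhi : hi ≤ lst.length) (hle : lo ≤ hi)
    (h1 : ∀ m, m < lo → m < lst.length → lst.getD m 0 < cur)
    (h2 : ∀ m, hi ≤ m → m < lst.length → cur ≤ lst.getD m 0) :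
    pvBisect lst cur lo hi ≤ lst.length ∧
    (∀ m, m < pvBisect lst cur lo hi → m < lst.length → lst.getD m 0 < cur) ∧
    (∀ m, pvBisect lst cur lo hi ≤ m → m < lst.length → cur ≤ lst.getD m 0) := by
  revert hhi hle h1 h2
  induction lo, hi using pvBisect.induct (lst := lst) (cur := cur) with
  | case1 lo hi hlt mid hmid ih =>
    intro hhi hle h1 h2
    have hm : mid = (lo + hi) / 2 := rfl
    rw [pvBisect]
    simp only [hlt, if_true, ← hm]
    rw [if_pos hmid]
    refine ih hhi (by omega) (fun m hm' hml => ?_) h2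
    rcases Nat.lt_or_ge m lo with h | h
    · exact h1 m h hml
    · calc lst.getD m 0 ≤ lst.getD mid 0 := hmono m mid (by omega) (by omega)
        _ < cur := hmid
  | case2 lo hi hlt mid hmid ih =>
    intro hhi hle h1 h2
    have hm : mid = (lo + hi) / 2 := rfl
    rw [pvBisect]
    simp only [hlt, if_true, ← hm]
    rw [if_neg hmid]
    refine ih (by omega) (by omega) h1 (fun m hm' hml => ?_)
    rcases Nat.lt_or_ge m hi with h | h
    · calc cur ≤ lst.getD mid 0 := Int.not_lt.mp hmid
        _ ≤ lst.getD m 0 := hmono mid m (by omega) hml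
    · exact h2 m h hml
  | case3 lo hi hlt =>
    intro hhi hle h1 h2
    rw [pvBisect]
    simp only [hlt, if_false]
    exact ⟨by omega, fun m hm hml => h1 m hm hml, fun m hm hml => h2 m (by omega) hml⟩

-- main bridge: the consume-based check on the suffix l.drop nn equals B's cursor-based check
theorem pvGoB_eq_pvMatchB (l : List Char) (cs : List Char) (nn : Nat) (hnn : nn ≤ l.length) :
    pvGoB cs (l.drop nn) = pvMatchB (pvBuildPos (PySem.List.enumerate l) PySem.Dict.empty) cs (nn : Int) := by
  induction cs generalizing nn with
  | nil => simp [pvGoB, pvMatchB]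
  | cons c cs ih =>
    set pos := pvBuildPos (PySem.List.enumerate l) PySem.Dict.empty with hpos
    have hlst : pos.getD c [] = pvOcc l c 0 := pvPos_getD l c
    set N := pvOcc l c 0 with hN
    -- split N at position nn
    have hsplit : N = pvOcc (l.take nn) c 0 ++ pvOcc (l.drop nn) c nn := by
      conv_lhs => rw [hN, ← List.take_append_drop nn l]
      rw [pvOcc_append]
      congr 2
      simp [List.length_take, Nat.min_eq_left hnn]
    set P := pvOcc (l.take nn) c 0 with hP
    set S := pvOcc (l.drop nn) c nn with hS
    have hPlt : ∀ k ∈ P, k < (nn : Int) := by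
      intro k hk
      have := pvOcc_mem_lt hk
      have hlen : ((l.take nn).length : Int) = nn := by
        simp [List.length_take, Nat.min_eq_left hnn]
      omega
    have hSge : ∀ k ∈ S, (nn : Int) ≤ k := fun k hk => pvOcc_mem_ge hk
    set r := pvBisect N (nn : Int) 0 N.length with hr
    have hspec := pvBisect_spec N (nn : Int) (fun i j => pvOcc_mono l c) 0 N.length (le_refl _)
      (Nat.zero_le _) (by omega) (fun m hm hml => by omega)
    obtain ⟨hrle, hpre, hsuf⟩ := hspec
    have hNlen : N.length = P.length + S.length := by rw [hsplit]; simp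
    -- r = P.length
    have hrP : r = P.length := by
      rcases Nat.lt_trichotomy r P.length with h | h | h
      · exfalso
        have hml : r < N.length := by omega
        have hge := hsuf r (le_refl _) hml
        have hq : N[r]? = P[r]? := by rw [hsplit]; exact List.getElem?_append_left h
        have : N.getD r 0 ∈ P := by
          rw [List.getD_eq_getElem?_getD, hq, List.getElem?_eq_getElem h]
          exact List.getElem_mem _
        have := hPlt _ this
        omega
      · exact h
      · exfalso
        have hml : P.length < N.length := by omega
        have hlt := hpre P.length h hml
        have hq : N[P.length]? = S[0]? := by
          rw [hsplit, List.getElem?_append_right (le_refl _)]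
          simp
        have hS0 : 0 < S.length := by omega
        have : N.getD P.length 0 ∈ S := by
          rw [List.getD_eq_getElem?_getD, hq, List.getElem?_eq_getElem hS0]
          exact List.getElem_mem _
        have := hSge _ this
        omega
    -- unfold both sides one step
    rw [pvGoB, pvConsume_eq_occ_head (l.drop nn) c (nn : Int), ← hS]
    rw [pvMatchB]
    simp only [hlst, ← hr, hrP]
    cases hSc : S with
    | nil =>
      have : P.length = N.length := by rw [hNlen, hSc]; simp
      simp [this]
    | cons k S' =>
      have hkne : P.length ≠ N.length := by rw [hNlen, hSc]; simp
      have hml : P.length < N.length := by rw [hNlen, hSc]; simp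
      have hq : N[P.length]? = S[0]? := by
        rw [hsplit, List.getElem?_append_right (le_refl _)]
        simp
      have hNk : N.getD P.length 0 = k := by
        rw [List.getD_eq_getElem?_getD, hq, hSc]
        simp
      have hkmem : k ∈ S := by rw [hSc]; simp
      have hkge : (nn : Int) ≤ k := hSge _ hkmem
      have hklt : k < (l.length : Int) := by
        have : k ∈ N := by rw [hsplit]; exact List.mem_append_right _ hkmem
        have := pvOcc_mem_lt this
        omega
      have hk0 : 0 ≤ k := by omega
      simp only [List.head?_cons, Option.map_some, if_neg hkne, hNk]
      have hdrop : (l.drop nn).drop ((k - (nn : Int)).toNat + 1) = l.drop (k.toNat + 1) := by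
        rw [List.drop_drop]
        congr 1
        omega
      rw [hdrop]
      have hle2 : k.toNat + 1 ≤ l.length := by omega
      have := ih (k.toNat + 1) hle2
      rw [this]
      congr 1
      push_cast
      omega

-- ===== VERDICT (by name: the statement is the Claim_ definition above) =====
theorem find_word_within_a_string_py_spec : Claim_equal_find_word_within_a_string_py := by
  intro s ss _
  unfold Spec_find_word_within_a_string_py find_word_within_a_string_py find_word_within_a_string_py_alt
  rw [pvGoA_eq_pvGoB]
  have := pvGoB_eq_pvMatchB s.toList ss.toList 0 (Nat.zero_le _)
  simpa using this
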